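-- pv_equiv track=rewrite | github.com/harishankarn04/Openlab_B210_SDR | test_fec.py | hamming_8_4_encode
-- ===== SOURCE A (Python) =====
-- def hamming_8_4_encode(nibble):
--     # nibble is 4 bits: d1, d2, d3, d4
--     d = [(nibble >> i) & 1 for i in range(4)][::-1] # MSB first: d1 = d[0]
--     p1 = d[0] ^ d[1] ^ d[3]
--     p2 = d[0] ^ d[2] ^ d[3]
--     p3 = d[1] ^ d[2] ^ d[3]
--     # Data: p1 p2 d1 p3 d2 d3 d4
--     # Indices: 1, 2, 3, 4, 5, 6, 7
--     # Overall parity p0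
--     bits = [p1, p2, d[0], p3, d[1], d[2], d[3]]
--     p0 = sum(bits) % 2
--     return (p0 << 7) | (p1 << 6) | (p2 << 5) | (d[0] << 4) | (p3 << 3) | (d[1] << 2) | (d[2] << 1) | d[3]
-- ===== SOURCE B (Python) =====
-- def hamming_8_4_encode(nibble):
--     # Generator-matrix form of the Hamming(8,4) code: each output bit (MSB first:
--     # p0 p1 p2 d1 p3 d2 d3 d4) is the parity of the data bits selected by its row mask
--     # (mask bit i selects nibble bit i); p0's row is the XOR-fold of the others.
--     rows = (0b1110, 0b1101, 0b1011, 0b1000, 0b0111, 0b0100, 0b0010, 0b0001)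
--     out = 0
--     for row in rows:
--         acc = 0
--         for i in range(4):
--             if (row >> i) % 2:
--                 acc += (nibble >> i) % 2
--         out = (out << 1) | (acc % 2)
--     return out
-- ===== Notes on version B (the rewrite author's own statement) =====
-- stated objective: alternative
-- what changed: Replaces A's hand-written per-parity XOR equations and explicit bit list with a generator-matrix loop: one row mask per output bit (p0's row derived by XOR-folding the others), each output bit computed as the parity of the data bits its mask selects and shifted into the result.
import Mathlib
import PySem

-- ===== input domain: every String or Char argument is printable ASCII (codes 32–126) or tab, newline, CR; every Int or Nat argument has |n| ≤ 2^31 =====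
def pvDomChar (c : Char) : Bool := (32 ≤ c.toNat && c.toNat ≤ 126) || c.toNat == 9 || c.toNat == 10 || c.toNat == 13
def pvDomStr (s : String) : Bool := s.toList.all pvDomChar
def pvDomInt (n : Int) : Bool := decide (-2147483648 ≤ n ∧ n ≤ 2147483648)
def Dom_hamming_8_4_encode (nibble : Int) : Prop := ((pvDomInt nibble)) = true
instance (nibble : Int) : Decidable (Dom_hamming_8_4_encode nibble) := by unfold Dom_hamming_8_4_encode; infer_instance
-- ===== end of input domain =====

-- B replaces A's hand-written parity equations by a generator-matrix loop (8 row masks,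
-- each output bit = parity of the selected data bits); objective: alternative, same cost.

-- ===== PORT A =====
def hamming_8_4_encode (nibble : Int) : Int :=
  -- d = [(nibble >> i) & 1 for i in range(4)][::-1]
  let d := ((PySem.List.pyRange 0 4 1).map (fun i => PySem.Int.band (nibble >>> i.toNat) 1)).reverse
  -- indices 0..3 are always in range (d has length 4), so pyGetD's default is never used
  let d0 := PySem.List.pyGetD d 0 0
  let d1 := PySem.List.pyGetD d 1 0
  let d2 := PySem.List.pyGetD d 2 0
  let d3 := PySem.List.pyGetD d 3 0
  let p1 := PySem.Int.bxor (PySem.Int.bxor d0 d1) d3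
  let p2 := PySem.Int.bxor (PySem.Int.bxor d0 d2) d3
  let p3 := PySem.Int.bxor (PySem.Int.bxor d1 d2) d3
  let bits := [p1, p2, d0, p3, d1, d2, d3]
  let p0 := PySem.Int.mod bits.sum 2
  PySem.Int.bor (PySem.Int.bor (PySem.Int.bor (PySem.Int.bor (PySem.Int.bor (PySem.Int.bor
    (PySem.Int.bor (p0 <<< 7) (p1 <<< 6)) (p2 <<< 5)) (d0 <<< 4)) (p3 <<< 3)) (d1 <<< 2)) (d2 <<< 1)) d3

-- ===== PORT B =====
def hamming_8_4_encode_alt (nibble : Int) : Int :=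
  [(14 : Int), 13, 11, 8, 7, 4, 2, 1].foldl
    (fun out row =>
      let acc := (PySem.List.pyRange 0 4 1).foldl
        (fun acc i =>
          if PySem.Int.mod (row >>> i.toNat) 2 ≠ 0 then acc + PySem.Int.mod (nibble >>> i.toNat) 2
          else acc) 0
      PySem.Int.bor (out <<< 1) (PySem.Int.mod acc 2)) 0

-- ===== PRECONDITION & SPEC =====
def Spec_hamming_8_4_encode (nibble : Int) (out : Int) : Prop := out = hamming_8_4_encode_alt nibble
instance (nibble : Int) (out : Int) : Decidable (Spec_hamming_8_4_encode nibble out) := by unfold Spec_hamming_8_4_encode; infer_instance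

-- ===== CLAIM (what is proved, stated in full; the proofs are below) =====
def Claim_equal_hamming_8_4_encode : Prop := ∀ (nibble : Int), Dom_hamming_8_4_encode nibble → Spec_hamming_8_4_encode nibble (hamming_8_4_encode nibble)

-- ===== LEMMAS AND PROOFS =====
theorem hamming_key (n : Int) : hamming_8_4_encode n = hamming_8_4_encode_alt n := by
  have hr : PySem.List.pyRange 0 4 1 = [0, 1, 2, 3] := by decide
  have hsh : ∀ k : Nat, n >>> ((k : Nat) : Int) = n >>> k := Int.shiftRight_natCast_right n
  have hb : ∀ k : Nat, PySem.Int.band (n >>> ((k : Nat) : Int)) 1 = n / (2 ^ k : Nat) % 2 := by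
    intro k
    rw [hsh, PySem.Int.band_one, PySem.Int.mod_eq_emod_of_pos (by norm_num), Int.shiftRight_eq_div_pow]
  have hm : ∀ k : Nat, PySem.Int.mod (n >>> ((k : Nat) : Int)) 2 = n / (2 ^ k : Nat) % 2 := by
    intro k
    rw [hsh, PySem.Int.mod_eq_emod_of_pos (by norm_num), Int.shiftRight_eq_div_pow]
  have hb0 := hb 0; have hb1 := hb 1; have hb2 := hb 2; have hb3 := hb 3
  have hm0 := hm 0; have hm1 := hm 1; have hm2 := hm 2; have hm3 := hm 3
  norm_num at hb0 hb1 hb2 hb3 hm0 hm1 hm2 hm3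
  simp only [hamming_8_4_encode, hamming_8_4_encode_alt, hr, List.map, List.reverse,
    List.foldl, List.sum_cons, List.sum_nil]
  norm_num [PySem.List.pyGetD, PySem.List.pyGet?, PySem.List.pyIdx?]
  simp only [show Int.toNat 2 = 2 from rfl, show Int.toNat 3 = 3 from rfl, List.getElem_cons_succ, List.getElem_cons_zero, hb0, hb1, hb2, hb3, hm0, hm1, hm2, hm3]
  rcases Int.emod_two_eq n with h0 | h0 <;>
  rcases Int.emod_two_eq (n / 2) with h1 | h1 <;>
  rcases Int.emod_two_eq (n / 4) with h2 | h2 <;>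
  rcases Int.emod_two_eq (n / 8) with h3 | h3 <;>
    simp only [h0, h1, h2, h3] <;> decide

-- ===== VERDICT (by name: the statement is the Claim_ definition above) =====
theorem hamming_8_4_encode_spec : Claim_equal_hamming_8_4_encode := by
  intro n _
  unfold Spec_hamming_8_4_encode
  exact hamming_key n
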